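-- pv_equiv track=rewrite | github.com/Temitopeade23/number-classification-api2 | app.py | get_number_properties
-- ===== SOURCE A (Python) =====
-- def is_armstrong(num):
--     """Checks if a number is an Armstrong number."""
--     num_str = str(int(num))  # Convert to string without decimals
--     n = len(num_str)
--     sum_of_powers = sum(int(digit) ** n for digit in num_str)
--     return sum_of_powers == num
--
-- def get_number_properties(num):
--     """Calculates mathematical properties of a number."""
--     properties = []
--     if is_armstrong(num):
--         properties.append("armstrong")
--     if num % 2 != 0:
--         properties.append("odd")
--     else:
--         properties.append("even")
--     digit_sum = sum(int(digit) for digit in str(int(num)))  # Sum of digits (excluding decimal point)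
--     return properties, digit_sum
-- ===== SOURCE B (Python) =====
-- def get_number_properties(num):
--     """Calculates mathematical properties of a number via arithmetic digit
--     extraction (divmod), no string conversion."""
--     digits = []  # little-endian digits of num
--     m = num
--     while m >= 10:
--         digits.append(m % 10)
--         m //= 10
--     digits.append(m)
--     n = len(digits)
--     digit_sum = sum(digits)
--     properties = ["armstrong"] if sum(d ** n for d in digits) == num else []
--     properties.append("odd" if num % 2 != 0 else "even")
--     return properties, digit_sum
-- ===== Notes on version B (the rewrite author's own statement) =====
-- stated objective: alternative
-- what changed: Replaced the string-based digit handling (str(int(num)) plus two generator passes mapping characters back to ints) by pure-arithmetic digit extraction: a divmod-by-10 loop builds the little-endian digit list, from which length, digit sum and the Armstrong power sum are computed; no string is ever built.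
import Mathlib
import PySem

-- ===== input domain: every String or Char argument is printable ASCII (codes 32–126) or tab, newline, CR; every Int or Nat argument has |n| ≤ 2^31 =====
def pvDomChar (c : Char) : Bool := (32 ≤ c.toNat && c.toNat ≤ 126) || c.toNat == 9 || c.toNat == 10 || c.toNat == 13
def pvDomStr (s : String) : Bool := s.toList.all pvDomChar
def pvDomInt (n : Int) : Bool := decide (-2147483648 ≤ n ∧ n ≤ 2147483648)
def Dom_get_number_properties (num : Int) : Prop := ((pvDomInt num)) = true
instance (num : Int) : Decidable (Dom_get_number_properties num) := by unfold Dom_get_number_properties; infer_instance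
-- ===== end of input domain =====

-- B drops the string round-trip: it extracts the digits arithmetically with a divmod-by-10 loop
-- and computes length, digit sum and the Armstrong power sum from that digit list ("alternative").

-- int(digit) on a single character (digit chars only inside Pre_; Python raises on '-', excluded by Pre_)
def pvCharInt (c : Char) : Int := (PySem.Int.ofStr? (String.singleton c)).getD 0

-- ===== PORT A =====
def is_armstrong_port (num : Int) : Bool :=
  let num_str := PySem.Int.toStr num
  let n := num_str.toList.length
  let sum_of_powers := (num_str.toList.map (fun digit => (pvCharInt digit) ^ n)).sum
  decide (sum_of_powers = num)

def get_number_properties (num : Int) : List String × Int :=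
  let properties : List String :=
    (if is_armstrong_port num then ["armstrong"] else []) ++
    (if PySem.Int.mod num 2 ≠ 0 then ["odd"] else ["even"])
  let digit_sum := ((PySem.Int.toStr num).toList.map pvCharInt).sum
  (properties, digit_sum)

-- ===== PORT B =====
-- the `while m >= 10: append(m % 10); m //= 10` loop followed by `append(m)`, little-endian digits
def pvDigitsB (m : Int) : List Int :=
  if _h : 10 ≤ m then PySem.Int.mod m 10 :: pvDigitsB (PySem.Int.floordiv m 10) else [m]
termination_by m.toNat
decreasing_by
  rw [PySem.Int.floordiv_eq_ediv_of_pos (by omega : (0:Int) < 10)]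
  omega

def get_number_properties_alt (num : Int) : List String × Int :=
  let digits := pvDigitsB num
  let n := digits.length
  let digit_sum := digits.sum
  let properties : List String :=
    (if (digits.map (fun d => d ^ n)).sum = num then ["armstrong"] else []) ++
    (if PySem.Int.mod num 2 ≠ 0 then ["odd"] else ["even"])
  (properties, digit_sum)

-- ===== PRECONDITION & SPEC =====
-- Pre_ excludes negative inputs: there str(int(num)) starts with '-' and int('-') raises ValueError in A.
def Pre_get_number_properties (num : Int) : Prop := 0 ≤ num
instance (num : Int) : Decidable (Pre_get_number_properties num) := by unfold Pre_get_number_properties; infer_instance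
def pvWitness_get_number_properties : Int := 153

def Spec_get_number_properties (num : Int) (out : List String × Int) : Prop := out = get_number_properties_alt num
instance (num : Int) (out : List String × Int) : Decidable (Spec_get_number_properties num out) := by unfold Spec_get_number_properties; infer_instance

-- ===== CLAIM =====
def Claim_equal_get_number_properties : Prop := ∀ (num : Int), Dom_get_number_properties num → Pre_get_number_properties num → Spec_get_number_properties num (get_number_properties num)

-- ===== LEMMAS AND PROOFS =====

-- Nat mirror of B's digit loop
def pvDigitsNat (k : Nat) : List Nat :=
  if h : 10 ≤ k then k % 10 :: pvDigitsNat (k / 10) else [k]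
termination_by k
decreasing_by omega

theorem pvDigitsNat_lt {k : Nat} {d : Nat} (hd : d ∈ pvDigitsNat k) : d < 10 := by
  induction k using pvDigitsNat.induct with
  | case1 k h ih =>
    rw [pvDigitsNat, dif_pos h] at hd
    rcases List.mem_cons.mp hd with h1 | h2
    · omega
    · exact ih h2
  | case2 k h =>
    rw [pvDigitsNat, dif_neg h] at hd
    simp at hd; omega

theorem pvDigitsB_natCast (k : Nat) : pvDigitsB (k : Int) = (pvDigitsNat k).map Int.ofNat := by
  induction k using pvDigitsNat.induct with
  | case1 k h ih =>
    rw [pvDigitsB, pvDigitsNat, dif_pos h, dif_pos (by exact_mod_cast h)]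
    simp only [List.map_cons]
    congr 1
    · exact_mod_cast PySem.Int.mod_natCast k 10
    · rw [show PySem.Int.floordiv (k : Int) 10 = ((k / 10 : Nat) : Int) from
        (by exact_mod_cast PySem.Int.floordiv_natCast k 10)]
      exact ih
  | case2 k h =>
    rw [pvDigitsB, pvDigitsNat, dif_neg h, dif_neg (by exact_mod_cast h)]
    simp

theorem pvCharInt_digitChar {d : Nat} (hd : d < 10) : pvCharInt (Nat.digitChar d) = (d : Int) := by
  interval_cases d <;> decide

-- Nat.toDigitsCore with enough fuel produces exactly the reversed little-endian digit characters
theorem toDigitsCore_eq (fuel : Nat) : ∀ (k : Nat) (ds : List Char), k < fuel →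
    Nat.toDigitsCore 10 fuel k ds = (pvDigitsNat k).reverse.map Nat.digitChar ++ ds := by
  induction fuel with
  | zero => intro k ds h; omega
  | succ fuel ih =>
    intro k ds h
    rw [Nat.toDigitsCore]
    by_cases h10 : 10 ≤ k
    · have hne : k / 10 ≠ 0 := by omega
      rw [if_neg hne, show pvDigitsNat k = k % 10 :: pvDigitsNat (k / 10) from
        (by rw [pvDigitsNat, dif_pos h10]), ih (k / 10) _ (by omega)]
      simp
    · have heq : k / 10 = 0 := by omega
      rw [if_pos heq, pvDigitsNat, dif_neg h10]
      simp [Nat.mod_eq_of_lt (by omega : k < 10)]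

theorem toDigits_eq (k : Nat) :
    Nat.toDigits 10 k = (pvDigitsNat k).reverse.map Nat.digitChar := by
  rw [Nat.toDigits, toDigitsCore_eq (k + 1) k [] (by omega)]
  simp

-- the bridge: A's character list mapped through int() = B's digit list, reversed
theorem toChars_map_pvCharInt (num : Int) (h : 0 ≤ num) :
    (PySem.Int.toChars num).map pvCharInt = (pvDigitsB num).reverse := by
  rw [PySem.Int.toChars, if_neg (by omega), toDigits_eq]
  rw [show num = ((num.toNat : Nat) : Int) from (by omega), pvDigitsB_natCast]
  rw [List.map_map, ← List.map_reverse]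
  apply List.map_congr_left
  intro d hd
  have : d < 10 := pvDigitsNat_lt (List.mem_reverse.mp hd)
  simp [Function.comp, pvCharInt_digitChar this]

-- ===== VERDICT =====
theorem get_number_properties_spec : Claim_equal_get_number_properties := by
  intro num _ hpre
  unfold Spec_get_number_properties get_number_properties get_number_properties_alt is_armstrong_port
  have hb := toChars_map_pvCharInt num hpre
  simp only [PySem.Int.toList_toStr]
  have hlen : (PySem.Int.toChars num).length = (pvDigitsB num).length := by
    rw [← List.length_map (f := pvCharInt), hb, List.length_reverse]
  have hpow : ((PySem.Int.toChars num).map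
      (fun digit => pvCharInt digit ^ (pvDigitsB num).length)).sum
      = ((pvDigitsB num).map (fun d => d ^ (pvDigitsB num).length)).sum := by
    rw [show (PySem.Int.toChars num).map (fun digit => pvCharInt digit ^ (pvDigitsB num).length)
        = ((PySem.Int.toChars num).map pvCharInt).map (fun d => d ^ (pvDigitsB num).length) from
      (by rw [List.map_map]; rfl), hb, List.map_reverse, List.sum_reverse]
  have hsum : ((PySem.Int.toChars num).map pvCharInt).sum = (pvDigitsB num).sum := by
    rw [hb, List.sum_reverse]
  simp only [hlen, decide_eq_true_eq, hpow, hsum]
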